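-- pv_equiv track=rewrite | github.com/wilmurillo-ai/Design-Assistant | .skills/openclaw-skills/skills/fkdias/brunson-academy/utils/formatter.py | add_telegram_formatting
-- ===== SOURCE A (Python) =====
-- def add_telegram_formatting(text):
--     """
--     Add Telegram-friendly formatting
--
--     Args:
--         text: Plain text
--
--     Returns:
--         str: Formatted text with markdown
--     """
--     # Simple markdown formatting
--     lines = text.split('\n')
--     formatted_lines = []
--
--     for line in lines:
--         # Headers
--         if line.startswith('# '):
--             formatted_lines.append(f"*{line[2:]}*")
--         elif line.startswith('## '):
--             formatted_lines.append(f"**{line[3:]}**")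
--         elif line.startswith('### '):
--             formatted_lines.append(f"__{line[4:]}__")
--         else:
--             formatted_lines.append(line)
--
--     return '\n'.join(formatted_lines)
-- ===== SOURCE B (Python) =====
-- def add_telegram_formatting(text):
--     """Single left-to-right character scan: at each line start count the
--     leading '#' characters, look the count up in a wrapper table, and wrap
--     the rest of the line; no split/branch-chain/join."""
--     WRAP = {1: '*', 2: '**', 3: '__'}
--     out = []
--     i = 0
--     n = len(text)
--     while True:
--         j = i
--         while j < n and text[j] != '\n':
--             j += 1
--         line = text[i:j]
--         k = 0
--         while k < len(line) and line[k] == '#':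
--             k += 1
--         w = WRAP.get(k)
--         if w is not None and k < len(line) and line[k] == ' ':
--             out.append(w + line[k + 1:] + w)
--         else:
--             out.append(line)
--         if j == n:
--             break
--         out.append('\n')
--         i = j + 1
--     return ''.join(out)
-- ===== Notes on version B (the rewrite author's own statement) =====
-- stated objective: alternative
-- what changed: Replaces A's split('\n')/four-branch startswith chain/join with a single left-to-right character scan that finds each line in place, counts its leading '#' characters, and looks the count up in a wrapper table.
import Mathlib
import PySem

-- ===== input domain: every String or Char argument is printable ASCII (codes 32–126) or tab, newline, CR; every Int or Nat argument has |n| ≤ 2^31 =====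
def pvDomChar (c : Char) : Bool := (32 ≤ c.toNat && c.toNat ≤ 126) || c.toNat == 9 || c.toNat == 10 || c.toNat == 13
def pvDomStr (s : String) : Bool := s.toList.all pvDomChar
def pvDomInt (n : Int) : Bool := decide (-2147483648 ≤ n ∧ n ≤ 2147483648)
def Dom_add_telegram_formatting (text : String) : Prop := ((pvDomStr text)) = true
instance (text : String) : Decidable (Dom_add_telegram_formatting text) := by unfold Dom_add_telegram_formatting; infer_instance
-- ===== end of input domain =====

-- B replaces A's split/branch-chain/join with one character scan that counts leading '#'s
-- per line and looks the count up in a wrapper table (objective: alternative).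

-- ===== PORT A =====
-- per-line body of A's for-loop: the startswith branch chain
def pvLineA (line : List Char) : List Char :=
  if PySem.Chars.startswith line ['#', ' '] then
    ['*'] ++ PySem.List.slice line (some 2) none ++ ['*']           -- f"*{line[2:]}*"
  else if PySem.Chars.startswith line ['#', '#', ' '] then
    ['*', '*'] ++ PySem.List.slice line (some 3) none ++ ['*', '*'] -- f"**{line[3:]}**"
  else if PySem.Chars.startswith line ['#', '#', '#', ' '] then
    ['_', '_'] ++ PySem.List.slice line (some 4) none ++ ['_', '_'] -- f"__{line[4:]}__"
  else line

def add_telegram_formatting (text : String) : String :=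
  String.ofList (PySem.Chars.join ['\n'] ((PySem.Chars.splitOn text.toList ['\n']).map pvLineA))

-- ===== PORT B =====
-- WRAP.get(k)
def pvWrap (k : Nat) : Option (List Char) :=
  if k = 1 then some ['*'] else if k = 2 then some ['*', '*']
  else if k = 3 then some ['_', '_'] else none

-- body of B's loop on one scanned-off line: count leading '#', look up, wrap
def pvLineB (line : List Char) : List Char :=
  let k := (line.takeWhile (fun c => c = '#')).length
  match pvWrap k with
  | some w => if getElem? line k = some ' ' then w ++ line.drop (k + 1) ++ w else line
  | none => line

-- B's outer while loop: scan chars up to the next '\n', emit the processed line, continue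
def pvGoB (cs : List Char) : List Char :=
  pvLineB (cs.takeWhile (fun c => c ≠ '\n')) ++
    (match h : cs.dropWhile (fun c => c ≠ '\n') with
     | [] => []
     | _ :: rest => '\n' :: pvGoB rest)
termination_by cs.length
decreasing_by
  have h1 : (cs.dropWhile (fun c => c ≠ '\n')).length ≤ cs.length :=
    List.length_dropWhile_le _ _
  rw [h] at h1; simp at h1; omega

def add_telegram_formatting_alt (text : String) : String := String.ofList (pvGoB text.toList)

-- ===== PRECONDITION & SPEC =====
def Spec_add_telegram_formatting (text : String) (out : String) : Prop := out = add_telegram_formatting_alt text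
instance (text : String) (out : String) : Decidable (Spec_add_telegram_formatting text out) := by unfold Spec_add_telegram_formatting; infer_instance

-- ===== CLAIM (what is proved, stated in full; the proofs are below) =====
def Claim_equal_add_telegram_formatting : Prop := ∀ (text : String), Dom_add_telegram_formatting text → Spec_add_telegram_formatting text (add_telegram_formatting text)

-- ===== LEMMAS AND PROOFS =====

-- a pure recursive characterisation of Python's str.split on a one-char separator
def pvSplitCh (c : Char) (cs : List Char) : List (List Char) :=
  cs.takeWhile (fun x => x ≠ c) ::
    (match h : cs.dropWhile (fun x => x ≠ c) with
     | [] => []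
     | _ :: rest => pvSplitCh c rest)
termination_by cs.length
decreasing_by
  have h1 : (cs.dropWhile (fun x => x ≠ c)).length ≤ cs.length :=
    List.length_dropWhile_le _ _
  rw [h] at h1; simp at h1; omega

lemma pvSplitCh_of_nil (c : Char) (cs : List Char)
    (h : cs.dropWhile (fun x => x ≠ c) = []) :
    pvSplitCh c cs = [cs.takeWhile (fun x => x ≠ c)] := by
  rw [pvSplitCh.eq_def]
  split
  · rfl
  · rename_i h2; rw [h] at h2; simp at h2

lemma pvSplitCh_of_cons (c : Char) (cs : List Char) (d : Char) (rest : List Char)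
    (h : cs.dropWhile (fun x => x ≠ c) = d :: rest) :
    pvSplitCh c cs = cs.takeWhile (fun x => x ≠ c) :: pvSplitCh c rest := by
  rw [pvSplitCh.eq_def]
  split
  · simp_all
  · rename_i h2; rw [h] at h2; cases h2; rfl

lemma pvGoB_of_nil (cs : List Char)
    (h : cs.dropWhile (fun c => c ≠ '\n') = []) :
    pvGoB cs = pvLineB (cs.takeWhile (fun c => c ≠ '\n')) := by
  rw [pvGoB.eq_def]
  split
  · simp
  · rename_i h2; rw [h] at h2; simp at h2

lemma pvGoB_of_cons (cs : List Char) (d : Char) (rest : List Char)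
    (h : cs.dropWhile (fun c => c ≠ '\n') = d :: rest) :
    pvGoB cs = pvLineB (cs.takeWhile (fun c => c ≠ '\n')) ++ '\n' :: pvGoB rest := by
  rw [pvGoB.eq_def]
  split
  · simp_all
  · rename_i h2; rw [h] at h2; cases h2; rfl

lemma pvSplitCh_ne_nil (c : Char) (cs : List Char) :
    ∃ a t, pvSplitCh c cs = a :: t := by
  cases h : cs.dropWhile (fun x => x ≠ c) with
  | nil => exact ⟨_, _, pvSplitCh_of_nil c cs h⟩
  | cons d rest => exact ⟨_, _, pvSplitCh_of_cons c cs d rest h⟩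

lemma pvGo_spec (c : Char) (fuel : Nat) (l cur : List Char) (acc : List (List Char))
    (hf : l.length ≤ fuel) :
    PySem.Chars.splitOn.go [c] fuel l cur acc =
      acc.reverse ++ (pvSplitCh c l).modifyHead (cur.reverse ++ ·) := by
  induction fuel generalizing l cur acc with
  | zero =>
    have : l = [] := by cases l <;> simp_all
    subst this
    rw [pvSplitCh_of_nil c [] (by simp)]
    simp [PySem.Chars.splitOn.go]
  | succ f ih =>
    cases l with
    | nil =>
      rw [pvSplitCh_of_nil c [] (by simp)]
      simp [PySem.Chars.splitOn.go]
    | cons ch rest =>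
      rw [PySem.Chars.splitOn.go]
      by_cases hc : ch = c
      · subst hc
        have hpre : List.isPrefixOf [ch] (ch :: rest) = true := by
          simp [List.isPrefixOf]
        simp only [hpre, if_pos]
        have hd : List.drop [ch].length (ch :: rest) = rest := by simp
        rw [hd, ih rest [] (cur.reverse :: acc) (by simp at hf; omega)]
        rw [pvSplitCh_of_cons ch (ch :: rest) ch rest (by simp)]
        obtain ⟨a, t, hs⟩ := pvSplitCh_ne_nil ch rest
        rw [hs]
        simp
      · have hpre : ¬ List.isPrefixOf [c] (ch :: rest) = true := by
          simp [List.isPrefixOf]; intro h; exact absurd h.symm hc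
        rw [if_neg hpre]
        rw [ih rest (ch :: cur) acc (by simp at hf; omega)]
        cases h : rest.dropWhile (fun x => x ≠ c) with
        | nil =>
          rw [pvSplitCh_of_nil c rest h,
            pvSplitCh_of_nil c (ch :: rest) (by simpa [List.dropWhile_cons, hc] using h)]
          simp [List.takeWhile_cons, hc]
        | cons d r =>
          rw [pvSplitCh_of_cons c rest d r h,
            pvSplitCh_of_cons c (ch :: rest) d r (by simpa [List.dropWhile_cons, hc] using h)]
          simp [List.takeWhile_cons, hc]

lemma pvSplitOn_singleton (c : Char) (cs : List Char) :
    PySem.Chars.splitOn cs [c] = pvSplitCh c cs := by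
  rw [PySem.Chars.splitOn, pvGo_spec c (cs.length + 1) cs [] [] (by omega)]
  obtain ⟨a, t, hs⟩ := pvSplitCh_ne_nil c cs
  rw [hs]
  simp

-- the startswith branch chain and the hash-count/table lookup agree on every line
lemma pvLineA_eq_pvLineB (line : List Char) : pvLineA line = pvLineB line := by
  cases line with
  | nil => simp [pvLineA, pvLineB, pvWrap, PySem.Chars.startswith, List.isPrefixOf]
  | cons c1 t1 =>
    by_cases h1 : c1 = '#'
    case neg =>
      simp [pvLineA, pvLineB, pvWrap, PySem.Chars.startswith, List.isPrefixOf,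
        List.takeWhile, h1, Ne.symm h1]
    subst h1
    cases t1 with
    | nil => simp [pvLineA, pvLineB, pvWrap, PySem.Chars.startswith, List.isPrefixOf,
        List.takeWhile]
    | cons c2 t2 =>
      by_cases h2 : c2 = ' '
      · subst h2
        rw [pvLineA, if_pos (by simp [PySem.Chars.startswith, List.isPrefixOf])]
        rw [PySem.List.slice_from _ (by norm_num)]
        simp [pvLineB, pvWrap, List.takeWhile]
      by_cases h2' : c2 = '#'
      case neg =>
        simp [pvLineA, pvLineB, pvWrap, PySem.Chars.startswith, List.isPrefixOf,
          List.takeWhile, h2, h2', Ne.symm h2, Ne.symm h2']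
      subst h2'
      cases t2 with
      | nil => simp [pvLineA, pvLineB, pvWrap, PySem.Chars.startswith, List.isPrefixOf,
          List.takeWhile, h2]
      | cons c3 t3 =>
        by_cases h3 : c3 = ' '
        · subst h3
          rw [pvLineA, if_neg (by simp [PySem.Chars.startswith, List.isPrefixOf, h2])]
          rw [if_pos (by simp [PySem.Chars.startswith, List.isPrefixOf])]
          rw [PySem.List.slice_from _ (by norm_num)]
          simp [pvLineB, pvWrap, List.takeWhile]
        by_cases h3' : c3 = '#'
        case neg =>
          simp [pvLineA, pvLineB, pvWrap, PySem.Chars.startswith, List.isPrefixOf,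
            List.takeWhile, h2, h3, h3', Ne.symm h3, Ne.symm h3']
        subst h3'
        cases t3 with
        | nil =>
          simp [pvLineA, pvLineB, pvWrap, PySem.Chars.startswith, List.isPrefixOf,
            List.takeWhile, h2, h3]
        | cons c4 t4 =>
          by_cases h4 : c4 = ' '
          · subst h4
            rw [pvLineA, if_neg (by simp [PySem.Chars.startswith, List.isPrefixOf, h2])]
            rw [if_neg (by simp [PySem.Chars.startswith, List.isPrefixOf, h3])]
            rw [if_pos (by simp [PySem.Chars.startswith, List.isPrefixOf])]
            rw [PySem.List.slice_from _ (by norm_num)]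
            simp [pvLineB, pvWrap, List.takeWhile]
          by_cases h4' : c4 = '#'
          case neg =>
            simp [pvLineA, pvLineB, pvWrap, PySem.Chars.startswith, List.isPrefixOf,
              List.takeWhile, h2, h3, h4, h4', Ne.symm h4, Ne.symm h4']
          subst h4'
          -- four or more leading '#': no branch of A fires, pvWrap misses
          rw [pvLineA, if_neg (by simp [PySem.Chars.startswith, List.isPrefixOf, h2])]
          rw [if_neg (by simp [PySem.Chars.startswith, List.isPrefixOf, h3])]
          rw [if_neg (by simp [PySem.Chars.startswith, List.isPrefixOf, h4])]
          rw [pvLineB]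
          have hk : (('#' :: '#' :: '#' :: '#' :: t4).takeWhile (fun c => c = '#')).length =
              4 + (t4.takeWhile (fun c => c = '#')).length := by
            simp [List.takeWhile]; omega
          simp only [hk]
          have hw : pvWrap (4 + (t4.takeWhile (fun c => c = '#')).length) = none := by
            unfold pvWrap
            rw [if_neg (by omega), if_neg (by omega), if_neg (by omega)]
          simp [hw]

-- join ∘ map(line body) ∘ split equals B's single scan
lemma pvJoin_map_eq_go (cs : List Char) :
    PySem.Chars.join ['\n'] ((pvSplitCh '\n' cs).map pvLineB) = pvGoB cs := by
  cases h : cs.dropWhile (fun x => x ≠ '\n') with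
  | nil =>
    rw [pvSplitCh_of_nil '\n' cs h, pvGoB_of_nil cs h]
    simp [PySem.Chars.join_singleton]
  | cons d rest =>
    rw [pvSplitCh_of_cons '\n' cs d rest h, pvGoB_of_cons cs d rest h]
    obtain ⟨a, t, hs⟩ := pvSplitCh_ne_nil '\n' rest
    have ih := pvJoin_map_eq_go rest
    rw [hs] at ih ⊢
    rw [List.map_cons, List.map_cons, PySem.Chars.join_cons_cons]
    rw [List.map_cons] at ih
    rw [ih]
    simp
termination_by cs.length
decreasing_by
  have h1 : (cs.dropWhile (fun x => x ≠ '\n')).length ≤ cs.length :=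
    List.length_dropWhile_le _ _
  rw [h] at h1; simp at h1; omega

-- ===== VERDICT (by name: the statement is the Claim_ definition above) =====
theorem add_telegram_formatting_spec : Claim_equal_add_telegram_formatting := by
  intro text _
  unfold Spec_add_telegram_formatting add_telegram_formatting add_telegram_formatting_alt
  rw [pvSplitOn_singleton]
  congr 1
  rw [← pvJoin_map_eq_go]
  congr 1
  exact List.map_congr_left (fun l _ => pvLineA_eq_pvLineB l)
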